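-- pv_equiv track=rewrite | github.com/qn06142/coding-python | csphn_thhv_recover.py | count_ways_to_add_commas
-- ===== SOURCE A (Python) =====
-- def count_ways_to_add_commas(s):
--     n = len(s)
--     dp = [1] * (n + 1)
--     for i in range(1, n + 1):
--         for j in range(i):
--             if s[j:i] > s[j-1:j] if j > 0 else True:
--                 dp[i] += dp[j]
--     return dp[-1]
-- ===== SOURCE B (Python) =====
-- def count_ways_to_add_commas(s):
--     # O(n) prefix-sum DP: the slice comparison s[j:i] > s[j-1:j] reduces to a
--     # character test: True iff j == 0, or s[j] > s[j-1], or (s[j] == s[j-1] and i > j+1).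
--     # sg accumulates dp[j] for valid j independent of i; se accumulates dp[j] for the
--     # equal-character case, which only counts once j < i-1 (hence the one-step 'pend' delay).
--     n = len(s)
--     sg, se, pend, prev = 0, 0, 0, 1   # prev = dp[0]
--     for i in range(1, n + 1):
--         j = i - 1
--         se += pend
--         pend = 0
--         if j == 0 or s[j] > s[j-1]:
--             sg += prev
--         elif s[j] == s[j-1]:
--             pend = prev
--         prev = 1 + sg + se
--     return prev
-- ===== Notes on version B (the rewrite author's own statement) =====
-- stated objective: faster
-- what changed: Replaced the O(n^3) nested-loop DP with slice comparisons by a single O(n) pass that reduces each slice comparison to a one-character test and maintains two running prefix sums (plus a one-step delayed term for the equal-character tie-break).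
import Mathlib
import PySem

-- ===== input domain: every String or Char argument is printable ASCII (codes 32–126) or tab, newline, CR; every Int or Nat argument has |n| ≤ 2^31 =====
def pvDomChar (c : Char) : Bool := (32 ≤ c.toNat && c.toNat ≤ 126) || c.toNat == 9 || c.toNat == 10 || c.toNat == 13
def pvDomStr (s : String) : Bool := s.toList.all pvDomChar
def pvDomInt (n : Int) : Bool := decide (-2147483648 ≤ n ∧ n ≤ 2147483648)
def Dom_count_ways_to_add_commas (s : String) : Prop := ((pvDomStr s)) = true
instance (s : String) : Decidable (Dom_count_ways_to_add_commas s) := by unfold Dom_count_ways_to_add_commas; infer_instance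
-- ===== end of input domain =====

-- B: a single O(n) pass with prefix sums instead of A's O(n^3) nested-loop DP; the slice
-- comparison is reduced to a one-character test (return value proved equal for all inputs).


def condA (l : List Char) (i j : Int) : Bool :=
  if j > 0 then
    decide (PySem.List.slice l (some (j - 1)) (some j) < PySem.List.slice l (some j) (some i))
  else true

-- ===== PORT A =====
def count_ways_to_add_commas (s : String) : Int :=
  let l := s.toList
  let n : Int := (l.length : Int)
  let dp : List Int := List.replicate (n + 1).toNat 1
  let dp := (PySem.List.pyRange 1 (n + 1) 1).foldl (fun dp i =>
    (PySem.List.pyRange 0 i 1).foldl (fun dp j =>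
      if condA l i j then PySem.List.pySetD dp i (PySem.List.pyGetD dp i 0 + PySem.List.pyGetD dp j 0)
      else dp) dp) dp
  PySem.List.pyGetD dp (-1) 0

-- ===== PORT B =====
def count_ways_to_add_commas_alt (s : String) : Int :=
  let l := s.toList
  let n : Int := (l.length : Int)
  let st : Int × Int × Int × Int := (0, 0, 0, 1)
  let st := (PySem.List.pyRange 1 (n + 1) 1).foldl (fun st i =>
    let sg := st.1
    let se := st.2.1
    let pend := st.2.2.1
    let prev := st.2.2.2
    let j := i - 1
    let se := se + pend
    let pend : Int := 0
    let sp : Int × Int :=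
      if j = 0 ∨ PySem.List.pyGetD l (j - 1) ' ' < PySem.List.pyGetD l j ' ' then
        (sg + prev, pend)
      else if PySem.List.pyGetD l j ' ' = PySem.List.pyGetD l (j - 1) ' ' then
        (sg, prev)
      else (sg, pend)
    let sg := sp.1
    let pend := sp.2
    let prev := 1 + sg + se
    (sg, se, pend, prev)) st
  st.2.2.2

-- ===== PRECONDITION & SPEC =====
def Spec_count_ways_to_add_commas (s : String) (out : Int) : Prop := out = count_ways_to_add_commas_alt s
instance (s : String) (out : Int) : Decidable (Spec_count_ways_to_add_commas s out) := by unfold Spec_count_ways_to_add_commas; infer_instance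

-- ===== CLAIM (what is proved, stated in full; the proofs are below) =====
def Claim_equal_count_ways_to_add_commas : Prop := ∀ (s : String), Dom_count_ways_to_add_commas s → Spec_count_ways_to_add_commas s (count_ways_to_add_commas s)

-- ===== LEMMAS AND PROOFS =====

def dpVec (l : List Char) : Nat → List Int
  | 0 => [1]
  | k+1 => dpVec l k ++
      [1 + ((List.range (k+1)).map
        (fun (j : Nat) => if condA l ((k : Int) + 1) (j : Int) then (dpVec l k).getD j 0 else 0)).sum]

def fdp (l : List Char) (k : Nat) : Int := (dpVec l k).getD k 0

def gB (l : List Char) (j : Nat) : Bool := j == 0 || decide (l.getD (j-1) ' ' < l.getD j ' ')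
def eB (l : List Char) (j : Nat) : Bool := l.getD j ' ' == l.getD (j-1) ' '

def SG (l : List Char) (k : Nat) : Int :=
  ((List.range k).map (fun j => if gB l j then fdp l j else 0)).sum
def SE (l : List Char) (k : Nat) : Int :=
  ((List.range k).map (fun j => if !gB l j && eB l j then fdp l j else 0)).sum
def PD (l : List Char) (k : Nat) : Int :=
  if k = 0 then 0 else if !gB l (k-1) && eB l (k-1) then fdp l (k-1) else 0

theorem length_dpVec (l : List Char) (k : Nat) : (dpVec l k).length = k + 1 := by
  induction k with
  | zero => rfl
  | succ k ih => simp [dpVec, ih]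

theorem getD_dpVec (l : List Char) {j k : Nat} (h : j ≤ k) :
    (dpVec l k).getD j 0 = fdp l j := by
  induction k with
  | zero => interval_cases j; rfl
  | succ k ih =>
    rcases Nat.lt_or_ge j (k+1) with hj | hj
    · rw [dpVec, List.getD_append _ _ _ _ (by rw [length_dpVec]; omega)]
      exact ih (by omega)
    · have hj' : j = k + 1 := by omega
      subst hj'
      rfl

theorem fdp_succ (l : List Char) (k : Nat) :
    fdp l (k+1) = 1 + ((List.range (k+1)).map
      (fun (j : Nat) => if condA l ((k : Int) + 1) (j : Int) then fdp l j else 0)).sum := by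
  have h1 : fdp l (k+1) = 1 + ((List.range (k+1)).map
      (fun (j : Nat) => if condA l ((k : Int) + 1) (j : Int) then (dpVec l k).getD j 0 else 0)).sum := by
    show (dpVec l (k+1)).getD (k+1) 0 = _
    rw [dpVec, List.getD_append_right _ _ _ _ (by rw [length_dpVec])]
    simp [length_dpVec]
  rw [h1]
  congr 1
  apply congrArg List.sum
  apply List.map_congr_left
  intro j hj
  rw [getD_dpVec l (Nat.le_of_lt_succ (List.mem_range.mp hj))]

theorem nil_lt' (t : List Char) : [] < t ↔ t ≠ [] := by
  cases t <;> simp [List.nil_lt_cons]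

theorem singleton_lt_cons (a b : Char) (t : List Char) :
    [a] < b :: t ↔ (a < b ∨ (a = b ∧ t ≠ [])) := by
  simp [List.cons_lt_cons_iff, nil_lt']

theorem condA_char (l : List Char) (i j : Nat) (hj : j < i) (hi : i ≤ l.length) :
    condA l (i : Int) (j : Int) =
      (gB l j || (!gB l j && eB l j && decide (j + 1 < i))) := by
  cases j with
  | zero => simp [condA, gB]
  | succ jj =>
    have hjl : jj + 1 < l.length := by omega
    have hjl' : jj < l.length := by omega
    unfold condA
    rw [if_pos (by positivity)]
    have e1 : ((jj + 1 : Nat) : Int) - 1 = ((jj : Nat) : Int) := by push_cast; ring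
    rw [e1, PySem.List.slice_natCast, PySem.List.slice_natCast]
    have d1 : List.drop jj l = l[jj] :: List.drop (jj+1) l := List.drop_eq_getElem_cons hjl'
    have d2 : List.drop (jj+1) l = l[jj+1] :: List.drop (jj+2) l := List.drop_eq_getElem_cons hjl
    rw [d1, d2]
    have e2 : jj + 1 - jj = 1 := by omega
    rw [e2]
    simp only [List.take_succ_cons, List.take_zero]
    have e3 : i - (jj + 1) = (i - (jj + 2)) + 1 := by omega
    rw [e3]
    simp only [List.take_succ_cons]
    have hg : gB l (jj+1) = decide (l[jj] < l[jj+1]) := by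
      simp [gB, List.getD_eq_getElem?_getD, hjl, hjl']
    have he : eB l (jj+1) = decide (l[jj+1] = l[jj]) := by
      rw [Bool.eq_iff_iff]; simp [eB, List.getD_eq_getElem?_getD, hjl, hjl']
    have hne : (List.take (i - (jj + 2)) (List.drop (jj + 2) l) ≠ [] ↔ jj + 1 + 1 < i) := by
      rw [← List.length_pos_iff_ne_nil, List.length_take, List.length_drop]
      omega
    rw [Bool.eq_iff_iff]
    simp only [decide_eq_true_eq, singleton_lt_cons, hg, he, hne, Bool.or_eq_true,
      Bool.and_eq_true, Bool.not_eq_true', decide_eq_false_iff_not]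
    constructor
    · rintro (h | ⟨h1, h2⟩)
      · exact Or.inl h
      · exact Or.inr ⟨⟨by rw [h1]; exact lt_irrefl _, h1.symm⟩, h2⟩
    · rintro (h | ⟨⟨h0, h1⟩, h2⟩)
      · exact Or.inl h
      · exact Or.inr ⟨h1.symm, h2⟩

theorem sum_map_add' (xs : List Nat) (f g : Nat → Int) :
    (xs.map (fun j => f j + g j)).sum = (xs.map f).sum + (xs.map g).sum := by
  induction xs with
  | nil => simp
  | cons x xs ih => simp [ih]; ring

theorem fdp_succ_split (l : List Char) (k : Nat) (hk : k + 1 ≤ l.length) :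
    fdp l (k+1) = 1 + SG l (k+1) + SE l k := by
  rw [fdp_succ]
  have hcast : ((k : Int) + 1) = ((k + 1 : Nat) : Int) := by push_cast; ring
  have h1 : (List.range (k+1)).map
      (fun (j : Nat) => if condA l ((k : Int) + 1) (j : Int) then fdp l j else 0) =
      (List.range (k+1)).map
      (fun (j : Nat) => (if gB l j then fdp l j else 0) +
        (if (!gB l j && eB l j && decide (j + 1 < k + 1)) then fdp l j else 0)) := by
    apply List.map_congr_left
    intro j hj
    have hj' : j < k + 1 := List.mem_range.mp hj
    rw [hcast, condA_char l (k+1) j hj' hk]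
    by_cases hg : gB l j
    · simp [hg]
    · simp [hg]
  rw [h1, sum_map_add']
  have h2 : (List.range (k+1)).map
      (fun (j : Nat) => if (!gB l j && eB l j && decide (j + 1 < k + 1)) then fdp l j else 0) =
      ((List.range k).map
      (fun (j : Nat) => if (!gB l j && eB l j) then fdp l j else 0)) ++ [0] := by
    rw [List.range_succ, List.map_append]
    congr 1
    · apply List.map_congr_left
      intro j hj
      have hj' : j < k := List.mem_range.mp hj
      simp [hj']
    · simp
  rw [h2]
  simp [SG, SE]
  ring

theorem innerA (l : List Char) (n k : Nat) (hk : k + 1 ≤ n) (dp0 : List Int)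
    (hlen : dp0.length = n + 1) (m : Nat) (hm : m ≤ k + 1) :
    (PySem.List.pyRange 0 (m : Int) 1).foldl
      (fun dp j => if condA l ((k + 1 : Nat) : Int) j then
          PySem.List.pySetD dp ((k + 1 : Nat) : Int)
            (PySem.List.pyGetD dp ((k + 1 : Nat) : Int) 0 + PySem.List.pyGetD dp j 0)
        else dp) dp0
    = dp0.set (k+1) (dp0.getD (k+1) 0 +
        ((List.range m).map
          (fun (j : Nat) => if condA l ((k + 1 : Nat) : Int) (j : Int) then dp0.getD j 0 else 0)).sum) := by
  induction m with
  | zero =>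
    rw [show ((0 : Nat) : Int) = 0 from rfl, PySem.List.pyRange_one_eq_nil (le_refl 0)]
    simp only [List.foldl_nil, List.range_zero, List.map_nil, List.sum_nil, add_zero]
    rw [List.getD_eq_getElem dp0 0 (by omega), List.set_getElem_self (by omega)]
  | succ m ih =>
    have hm' : m ≤ k + 1 := by omega
    have hc : ((m + 1 : Nat) : Int) = ((m : Nat) : Int) + 1 := by push_cast; ring
    rw [hc, PySem.List.pyRange_one_succ_right (by positivity), List.foldl_append]
    rw [ih hm']
    simp only [List.foldl_cons, List.foldl_nil]
    set c := dp0.getD (k+1) 0 with hcdef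
    set S := ((List.range m).map
      (fun (j : Nat) => if condA l ((k + 1 : Nat) : Int) (j : Int) then dp0.getD j 0 else 0)).sum with hS
    have hrs : ((List.range (m+1)).map
        (fun (j : Nat) => if condA l ((k + 1 : Nat) : Int) (j : Int) then dp0.getD j 0 else 0)).sum
        = S + (if condA l ((k + 1 : Nat) : Int) ((m : Nat) : Int) then dp0.getD m 0 else 0) := by
      rw [List.range_succ, List.map_append, List.sum_append]
      simp only [List.map_cons, List.map_nil, List.sum_cons, List.sum_nil, add_zero]
      rw [← hS]
    rw [hrs]
    by_cases hcond : condA l ((k + 1 : Nat) : Int) ((m : Nat) : Int)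
    · rw [if_pos hcond, if_pos hcond]
      rw [PySem.List.pySetD_natCast, PySem.List.pyGetD_natCast, PySem.List.pyGetD_natCast]
      have hki : k + 1 < dp0.length := by omega
      have hg1 : (dp0.set (k+1) (c + S)).getD (k+1) 0 = c + S := by
        rw [List.getD_eq_getElem?_getD, List.getElem?_set_self (by simpa using hki)]
        rfl
      have hg2 : (dp0.set (k+1) (c + S)).getD m 0 = dp0.getD m 0 := by
        simp [List.getD_eq_getElem?_getD, List.getElem?_set_ne (by omega : k + 1 ≠ m)]
      rw [hg1, hg2, List.set_set, add_assoc]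
    · rw [if_neg hcond, if_neg hcond, add_zero]

theorem outerA (l : List Char) (n : Nat) (hn : n = l.length) (k : Nat) (hk : k ≤ n) :
    (PySem.List.pyRange 1 ((k : Int) + 1) 1).foldl
      (fun dp i =>
        (PySem.List.pyRange 0 i 1).foldl
          (fun dp j => if condA l i j then
              PySem.List.pySetD dp i (PySem.List.pyGetD dp i 0 + PySem.List.pyGetD dp j 0)
            else dp) dp)
      (List.replicate (n+1) 1)
    = dpVec l k ++ List.replicate (n - k) 1 := by
  induction k with
  | zero =>
    rw [show ((0 : Nat) : Int) + 1 = 1 by ring, PySem.List.pyRange_one_eq_nil (le_refl 1)]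
    simp only [List.foldl_nil]
    rw [show n + 1 = 1 + n by ring, List.replicate_add]
    rfl
  | succ k ih =>
    have hk' : k ≤ n := by omega
    have hc : ((k + 1 : Nat) : Int) + 1 = ((k : Int) + 1) + 1 := by push_cast; ring
    rw [hc, PySem.List.pyRange_one_succ_right (by omega), List.foldl_append, ih hk']
    simp only [List.foldl_cons, List.foldl_nil]
    set dp0 := dpVec l k ++ List.replicate (n - k) 1 with hdp0
    have hlen : dp0.length = n + 1 := by
      rw [hdp0, List.length_append, length_dpVec, List.length_replicate]; omega
    have hc2 : ((k : Int) + 1) = ((k + 1 : Nat) : Int) := by push_cast; ring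
    rw [hc2, innerA l n k (by omega) dp0 hlen (k+1) (le_refl _)]
    have hg_top : dp0.getD (k+1) 0 = 1 := by
      rw [hdp0, List.getD_append_right _ _ _ _ (by rw [length_dpVec])]
      rw [length_dpVec, Nat.sub_self, List.getD_replicate _ (by omega)]
    have hsum : ((List.range (k+1)).map
        (fun (j : Nat) => if condA l ((k + 1 : Nat) : Int) (j : Int) then dp0.getD j 0 else 0)).sum
        = ((List.range (k+1)).map
        (fun (j : Nat) => if condA l ((k : Int) + 1) (j : Int) then (dpVec l k).getD j 0 else 0)).sum := by
      apply congrArg List.sum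
      apply List.map_congr_left
      intro j hj
      have hj' : j < k + 1 := List.mem_range.mp hj
      rw [hc2, hdp0, List.getD_append _ _ _ _ (by rw [length_dpVec]; omega)]
    rw [hg_top, hsum]
    rw [hdp0, List.set_append_right _ _ (by rw [length_dpVec])]
    rw [length_dpVec, Nat.sub_self]
    rw [show n - k = (n - (k+1)) + 1 by omega, List.replicate_succ, List.set_cons_zero]
    show dpVec l k ++ _ :: _ = dpVec l (k+1) ++ _
    rw [dpVec]
    simp

theorem SE_PD (l : List Char) (k : Nat) : SE l (k-1) + PD l k = SE l k := by
  cases k with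
  | zero => simp [SE, PD]
  | succ kk =>
    simp only [Nat.add_sub_cancel, PD, SE, List.range_succ, List.map_append, List.sum_append]
    simp

theorem SG_succ (l : List Char) (k : Nat) :
    SG l (k+1) = SG l k + (if gB l k then fdp l k else 0) := by
  rw [SG, List.range_succ, List.map_append, List.sum_append, ← SG]
  simp

theorem condG (l : List Char) (k : Nat) (hk : k < l.length) :
    ((((k : Nat) : Int) = 0 ∨
      PySem.List.pyGetD l (((k : Nat) : Int) - 1) ' ' < PySem.List.pyGetD l ((k : Nat) : Int) ' ')
      ↔ gB l k = true) := by
  cases k with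
  | zero => simp [gB]
  | succ kk =>
    have hc : ((kk + 1 : Nat) : Int) - 1 = ((kk : Nat) : Int) := by push_cast; ring
    rw [hc, PySem.List.pyGetD_natCast, PySem.List.pyGetD_natCast]
    simp [gB]
    omega

theorem condE (l : List Char) (k : Nat) (hk : 1 ≤ k) :
    ((PySem.List.pyGetD l ((k : Nat) : Int) ' ' =
      PySem.List.pyGetD l (((k : Nat) : Int) - 1) ' ')
      ↔ eB l k = true) := by
  rcases Nat.exists_eq_add_of_le hk with ⟨kk, rfl⟩
  have hc : ((1 + kk : Nat) : Int) - 1 = ((kk : Nat) : Int) := by push_cast; ring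
  rw [hc, PySem.List.pyGetD_natCast, PySem.List.pyGetD_natCast]
  simp [eB, show 1 + kk - 1 = kk by omega]

theorem PD_succ_g (l : List Char) (k : Nat) (hg : gB l k = true) : PD l (k+1) = 0 := by
  simp [PD, hg]

theorem outerB (l : List Char) (n : Nat) (hn : n = l.length) (k : Nat) (hk : k ≤ n) :
    (PySem.List.pyRange 1 ((k : Int) + 1) 1).foldl
      (fun st i =>
        let sg := st.1
        let se := st.2.1
        let pend := st.2.2.1
        let prev := st.2.2.2
        let j := i - 1
        let se := se + pend
        let pend : Int := 0
        let sp : Int × Int :=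
          if j = 0 ∨ PySem.List.pyGetD l (j - 1) ' ' < PySem.List.pyGetD l j ' ' then
            (sg + prev, pend)
          else if PySem.List.pyGetD l j ' ' = PySem.List.pyGetD l (j - 1) ' ' then
            (sg, prev)
          else (sg, pend)
        let sg := sp.1
        let pend := sp.2
        let prev := 1 + sg + se
        (sg, se, pend, prev)) ((0, 0, 0, 1) : Int × Int × Int × Int)
    = (SG l k, SE l (k-1), PD l k, fdp l k) := by
  induction k with
  | zero =>
    rw [show ((0 : Nat) : Int) + 1 = 1 by ring, PySem.List.pyRange_one_eq_nil (le_refl 1)]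
    simp only [List.foldl_nil]
    have : fdp l 0 = 1 := rfl
    simp [SG, SE, PD, this]
  | succ k ih =>
    have hk' : k ≤ n := by omega
    have hkl : k < l.length := by omega
    have hc : ((k + 1 : Nat) : Int) + 1 = ((k : Int) + 1) + 1 := by push_cast; ring
    rw [hc, PySem.List.pyRange_one_succ_right (by omega), List.foldl_append, ih hk']
    simp only [List.foldl_cons, List.foldl_nil]
    have hj : ((k : Int) + 1) - 1 = ((k : Nat) : Int) := by ring
    simp only [hj]
    rw [SE_PD]
    by_cases hg : gB l k = true
    · rw [if_pos ((condG l k hkl).mpr hg)]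
      simp only []
      refine Prod.ext ?_ (Prod.ext ?_ (Prod.ext ?_ ?_)) <;> simp only []
      · rw [SG_succ, if_pos hg]
      · simp
      · rw [PD_succ_g l k hg]
      · rw [fdp_succ_split l k (by omega), SG_succ, if_pos hg]
    · rw [if_neg (fun h => hg ((condG l k hkl).mp h))]
      have hk1 : 1 ≤ k := by
        by_contra h
        have : k = 0 := by omega
        subst this
        exact hg (by simp [gB])
      by_cases he : eB l k = true
      · rw [if_pos ((condE l k hk1).mpr he)]
        refine Prod.ext ?_ (Prod.ext ?_ (Prod.ext ?_ ?_)) <;> simp only []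
        · rw [SG_succ, if_neg (by simp [hg]), add_zero]
        · simp
        · simp [PD, hg, he]
        · rw [fdp_succ_split l k (by omega), SG_succ, if_neg (by simp [hg]), add_zero]
      · rw [if_neg (fun h => he ((condE l k hk1).mp h))]
        refine Prod.ext ?_ (Prod.ext ?_ (Prod.ext ?_ ?_)) <;> simp only []
        · rw [SG_succ, if_neg (by simp [hg]), add_zero]
        · simp
        · simp [PD, hg, he]
        · rw [fdp_succ_split l k (by omega), SG_succ, if_neg (by simp [hg]), add_zero]

theorem A_eq (s : String) :
    count_ways_to_add_commas s = fdp s.toList s.toList.length := by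
  unfold count_ways_to_add_commas
  simp only []
  rw [show ((s.toList.length : Int) + 1).toNat = s.toList.length + 1 by omega]
  rw [outerA s.toList s.toList.length rfl s.toList.length (le_refl _)]
  rw [Nat.sub_self, List.replicate_zero, List.append_nil]
  have hne : dpVec s.toList s.toList.length ≠ [] := by
    intro h
    have := length_dpVec s.toList s.toList.length
    rw [h] at this
    simp at this
  rw [PySem.List.pyGetD_neg_one _ _ hne, List.getLast_eq_getElem]
  rw [fdp, List.getD_eq_getElem _ _ (by rw [length_dpVec]; omega)]
  congr 1
  rw [length_dpVec]
  omega

theorem B_eq (s : String) :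
    count_ways_to_add_commas_alt s = fdp s.toList s.toList.length := by
  unfold count_ways_to_add_commas_alt
  simp only []
  rw [outerB s.toList s.toList.length rfl s.toList.length (le_refl _)]

-- ===== VERDICT (by name: the statement is the Claim_ definition above) =====
theorem count_ways_to_add_commas_spec : Claim_equal_count_ways_to_add_commas := by
  intro s _
  unfold Spec_count_ways_to_add_commas
  rw [A_eq, B_eq]
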